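-- pv_equiv track=rewrite | github.com/Alirezak2n/Mokapot | entrapment_counter.py | protein_encoder
-- ===== SOURCE A (Python) =====
-- def protein_encoder(protein):
--     encod = []
--     if not isinstance(protein, list):
--         protein = [protein]
--     for prot in protein:
--         if prot == "HUMAN":
--             encod.append('1')
--         elif prot == "Contaminant":
--             encod.append('3')
--         else:
--             encod.append('2')
--     encod = list(set(encod))
--     return ('').join(sorted(encod))
-- ===== SOURCE B (Python) =====
-- def protein_encoder(protein):
--     if not isinstance(protein, list):
--         protein = [protein]
--     out = ""
--     if "HUMAN" in protein:
--         out += "1"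
--     if any(p != "HUMAN" and p != "Contaminant" for p in protein):
--         out += "2"
--     if "Contaminant" in protein:
--         out += "3"
--     return out
-- ===== Notes on version B (the rewrite author's own statement) =====
-- stated objective: simpler
-- what changed: Replaces A's per-element classification loop with append/set-dedup/sorted/join by three independent membership queries on the raw input list ('HUMAN' present, any other label present, 'Contaminant' present), concatenating the matching digits in the fixed order; no encoding list, dedup or sort exists in B.
import Mathlib
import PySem

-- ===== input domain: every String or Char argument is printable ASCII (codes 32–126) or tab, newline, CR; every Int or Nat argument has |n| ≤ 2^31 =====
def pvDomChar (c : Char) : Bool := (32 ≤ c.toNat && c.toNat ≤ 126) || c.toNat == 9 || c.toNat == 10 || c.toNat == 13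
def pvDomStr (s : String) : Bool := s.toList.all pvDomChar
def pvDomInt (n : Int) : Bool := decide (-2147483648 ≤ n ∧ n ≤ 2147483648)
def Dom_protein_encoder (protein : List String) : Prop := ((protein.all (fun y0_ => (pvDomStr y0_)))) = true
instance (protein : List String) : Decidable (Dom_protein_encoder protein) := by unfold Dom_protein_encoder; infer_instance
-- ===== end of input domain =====

-- B drops A's classification loop + set-dedup + sort: it answers three independent membership
-- queries on the raw list and concatenates the matching digits in the fixed order (simpler).

-- ===== PORT A =====
def protein_encoder (protein : List String) : String :=
  let encod : List String := protein.foldl (fun acc prot =>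
    if prot == "HUMAN" then acc ++ ["1"]
    else if prot == "Contaminant" then acc ++ ["3"]
    else acc ++ ["2"]) []
  let encod2 : List String := PySem.Set.ofList encod
  PySem.Str.join "" (PySem.List.sorted encod2 (fun x => x) false)

-- ===== PORT B =====
def protein_encoder_alt (protein : List String) : String :=
  (if protein.contains "HUMAN" then "1" else "") ++
  (if protein.any (fun p => p != "HUMAN" && p != "Contaminant") then "2" else "") ++
  (if protein.contains "Contaminant" then "3" else "")

-- ===== PRECONDITION & SPEC =====
def Spec_protein_encoder (protein : List String) (out : String) : Prop := out = protein_encoder_alt protein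
instance (protein : List String) (out : String) : Decidable (Spec_protein_encoder protein out) := by unfold Spec_protein_encoder; infer_instance

-- ===== CLAIM (what is proved, stated in full; the proofs are below) =====
def Claim_equal_protein_encoder : Prop := ∀ (protein : List String), Dom_protein_encoder protein → Spec_protein_encoder protein (protein_encoder protein)

-- ===== LEMMAS AND PROOFS =====

/-- The character A appends for one protein label. -/
def pvEnc (prot : String) : String :=
  if prot == "HUMAN" then "1" else if prot == "Contaminant" then "3" else "2"

theorem pvEnc_mem (prot : String) : pvEnc prot ∈ ["1", "2", "3"] := by
  unfold pvEnc; split_ifs <;> simp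

/-- A's accumulation loop is `map pvEnc`. -/
theorem pvA_fold (protein : List String) (acc : List String) :
    protein.foldl (fun acc prot =>
      if prot == "HUMAN" then acc ++ ["1"]
      else if prot == "Contaminant" then acc ++ ["3"]
      else acc ++ ["2"]) acc = acc ++ protein.map pvEnc := by
  induction protein generalizing acc with
  | nil => simp
  | cons p t ih =>
    simp only [List.foldl_cons, List.map_cons, pvEnc]
    split_ifs <;> rw [ih] <;> simp

theorem pvMem1 (l : List String) : ("1" ∈ l.map pvEnc) ↔ "HUMAN" ∈ l := by
  simp only [List.mem_map, pvEnc]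
  constructor
  · rintro ⟨p, hp, he⟩
    by_cases h1 : p = "HUMAN"
    · exact h1 ▸ hp
    · by_cases h2 : p = "Contaminant" <;> simp only [h1, h2, if_true, if_false, beq_iff_eq ] at he <;> simp_all
  · intro h; exact ⟨"HUMAN", h, by simp⟩

theorem pvMem3 (l : List String) : ("3" ∈ l.map pvEnc) ↔ "Contaminant" ∈ l := by
  simp only [List.mem_map, pvEnc]
  constructor
  · rintro ⟨p, hp, he⟩
    by_cases h1 : p = "HUMAN"
    · simp [h1] at he
    · by_cases h2 : p = "Contaminant"
      · exact h2 ▸ hp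
      · simp [h1, h2] at he
  · intro h; exact ⟨"Contaminant", h, by simp⟩

theorem pvMem2 (l : List String) :
    ("2" ∈ l.map pvEnc) ↔ ∃ p ∈ l, p ≠ "HUMAN" ∧ p ≠ "Contaminant" := by
  simp only [List.mem_map, pvEnc]
  constructor
  · rintro ⟨p, hp, he⟩
    by_cases h1 : p = "HUMAN"
    · simp [h1] at he
    · by_cases h2 : p = "Contaminant"
      · simp [h2] at he
      · exact ⟨p, hp, h1, h2⟩
  · rintro ⟨p, hp, h1, h2⟩; exact ⟨p, hp, by simp [h1, h2]⟩

theorem pvPairwise123 : List.Pairwise (fun a b : String => a < b) ["1", "2", "3"] := by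
  refine List.pairwise_cons.2 ⟨?_, List.pairwise_cons.2 ⟨?_, ?_⟩⟩ <;>
    simp [String.lt_iff_toList_lt] <;> decide

theorem pvNodup_filter123 (l : List String) :
    (List.filter (fun s => decide (s ∈ l)) ["1", "2", "3"]).Nodup := by
  exact List.Nodup.filter _ (by decide)

/-- Characterisation of sorted(set(l)) when every element of l is among "1","2","3". -/
theorem pvSortedSet (l : List String) (h : ∀ x ∈ l, x ∈ ["1", "2", "3"]) :
    PySem.List.sorted (PySem.Set.ofList l) (fun x => x) false =
      List.filter (fun s => decide (s ∈ l)) ["1", "2", "3"] := by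
  apply PySem.List.sorted_eq_of_perm_of_pairwise_lt
  · rw [List.perm_ext_iff_of_nodup (pvNodup_filter123 l) (PySem.Set.nodup_ofList l)]
    intro a
    simp only [List.mem_filter, PySem.Set.mem_ofList, decide_eq_true_eq]
    constructor
    · rintro ⟨_, ha⟩; exact ha
    · intro ha; exact ⟨h a ha, ha⟩
  · exact List.Pairwise.filter _ pvPairwise123

theorem protein_encoder_eq (protein : List String) :
    protein_encoder protein = protein_encoder_alt protein := by
  unfold protein_encoder protein_encoder_alt
  rw [pvA_fold]
  simp only [List.nil_append]
  have hm : ∀ x ∈ protein.map pvEnc, x ∈ ["1", "2", "3"] := by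
    intro x hx
    simp only [List.mem_map] at hx
    obtain ⟨p, -, rfl⟩ := hx
    exact pvEnc_mem p
  rw [pvSortedSet (protein.map pvEnc) hm]
  have e1 : protein.contains "HUMAN" = decide ("1" ∈ protein.map pvEnc) := by
    simp [pvMem1]
  have e2 : protein.any (fun p => p != "HUMAN" && p != "Contaminant")
      = decide ("2" ∈ protein.map pvEnc) := by
    rw [Bool.eq_iff_iff]
    simp [List.any_eq_true, pvMem2]
  have e3 : protein.contains "Contaminant" = decide ("3" ∈ protein.map pvEnc) := by
    simp [pvMem3]
  rw [e1, e2, e3]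
  by_cases c1 : "1" ∈ protein.map pvEnc <;>
  by_cases c2 : "2" ∈ protein.map pvEnc <;>
  by_cases c3 : "3" ∈ protein.map pvEnc <;>
    simp [List.filter, c1, c2, c3] <;> decide

-- ===== VERDICT (by name: the statement is the Claim_ definition above) =====
theorem protein_encoder_spec : Claim_equal_protein_encoder := by
  intro protein _
  exact protein_encoder_eq protein
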